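-- pv_equiv track=rewrite | github.com/assafzimand/NCC-PINN | experiments_analysis/scripts/analyze_capacity_experiments_across_PDEs.py | get_weight_label_from_params
-- ===== SOURCE A (Python) =====
-- def get_weight_label_from_params(num_parameters: int) -> str:
--     """Convert number of parameters to a weight label bucket (5k, 10k, 20k, 30k, 40k).
--
--     Uses nearest bucket based on actual parameter count.
--     """
--     buckets = [5000, 10000, 20000, 30000, 40000]
--     bucket_labels = ['5k', '10k', '20k', '30k', '40k']
--
--     # Find closest bucket
--     min_diff = float('inf')
--     closest_label = bucket_labels[-1]
--
--     for bucket, label in zip(buckets, bucket_labels):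
--         diff = abs(num_parameters - bucket)
--         if diff < min_diff:
--             min_diff = diff
--             closest_label = label
--
--     return closest_label
-- ===== SOURCE B (Python) =====
-- def get_weight_label_from_params(num_parameters: int) -> str:
--     """Convert number of parameters to a weight label bucket (5k, 10k, 20k, 30k, 40k)."""
--     if num_parameters <= 7500:
--         return '5k'
--     if num_parameters <= 15000:
--         return '10k'
--     if num_parameters <= 25000:
--         return '20k'
--     if num_parameters <= 35000:
--         return '30k'
--     return '40k'
-- ===== Notes on version B (the rewrite author's own statement) =====
-- stated objective: simpler
-- what changed: Replaced the zip loop with min-distance tracking by a closed-form chain of four inclusive midpoint thresholds (7500/15000/25000/35000); ties at exact midpoints resolve to the lower bucket, matching A's strict-< first-wins rule.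
import Mathlib
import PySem

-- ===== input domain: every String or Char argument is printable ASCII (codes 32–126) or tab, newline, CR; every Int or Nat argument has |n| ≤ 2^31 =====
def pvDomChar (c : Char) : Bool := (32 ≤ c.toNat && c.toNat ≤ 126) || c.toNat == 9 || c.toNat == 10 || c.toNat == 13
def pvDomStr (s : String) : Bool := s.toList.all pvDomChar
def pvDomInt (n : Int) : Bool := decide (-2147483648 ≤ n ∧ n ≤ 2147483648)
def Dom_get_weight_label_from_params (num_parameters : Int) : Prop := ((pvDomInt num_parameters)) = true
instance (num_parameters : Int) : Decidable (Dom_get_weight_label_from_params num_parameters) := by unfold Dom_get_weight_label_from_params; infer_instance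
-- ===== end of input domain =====

-- ===== PORT A =====
-- A: scan the five buckets tracking the minimal |n - bucket|; min_diff starts at +inf,
-- modelled as Option Int (none = inf).
def get_weight_label_from_params (num_parameters : Int) : String :=
  let pairs : List (Int × String) :=
    [(5000, "5k"), (10000, "10k"), (20000, "20k"), (30000, "30k"), (40000, "40k")]
  let st := pairs.foldl (fun (st : Option Int × String) bl =>
    let diff : Int := ((num_parameters - bl.1).natAbs : Int)
    match st.1 with
    | none => (some diff, bl.2)
    | some md => if diff < md then (some diff, bl.2) else st) (none, "40k")
  st.2

-- ===== PORT B =====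
-- B: closed-form inclusive midpoint thresholds (ties go to the lower bucket).
def get_weight_label_from_params_alt (num_parameters : Int) : String :=
  if num_parameters ≤ 7500 then "5k"
  else if num_parameters ≤ 15000 then "10k"
  else if num_parameters ≤ 25000 then "20k"
  else if num_parameters ≤ 35000 then "30k"
  else "40k"

-- ===== PRECONDITION & SPEC =====
def Spec_get_weight_label_from_params (num_parameters : Int) (out : String) : Prop := out = get_weight_label_from_params_alt num_parameters
instance (num_parameters : Int) (out : String) : Decidable (Spec_get_weight_label_from_params num_parameters out) := by unfold Spec_get_weight_label_from_params; infer_instance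

-- ===== CLAIM (what is proved, stated in full; the proofs are below) =====
def Claim_equal_get_weight_label_from_params : Prop := ∀ (num_parameters : Int), Dom_get_weight_label_from_params num_parameters → Spec_get_weight_label_from_params num_parameters (get_weight_label_from_params num_parameters)

-- ===== LEMMAS AND PROOFS =====

-- ===== VERDICT (by name: the statement is the Claim_ definition above) =====
theorem get_weight_label_from_params_spec : Claim_equal_get_weight_label_from_params := by
  intro n _
  unfold Spec_get_weight_label_from_params get_weight_label_from_params
    get_weight_label_from_params_alt
  simp only [List.foldl]
  split_ifs <;> dsimp only <;> split_ifs <;> dsimp only <;> split_ifs <;> dsimp only <;>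
    split_ifs <;> first | rfl | omega
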